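-- pv_equiv track=rewrite | github.com/riddhindoshi/TDD_Python | movie_trivia.py | get_co_actors
-- ===== SOURCE A (Python) =====
-- def select_where_actor_is(actor_name, actordb):
--     '''
--     This function returns a list of all movies the actor_name passed as an input has acted in. Return: list of movies
--     '''
--
--     # if the actor_name isnt in database, return empty list
--     if actor_name not in actordb.keys():
--         return []
--     return actordb[actor_name]
--
-- def select_where_movie_is(movie_name, actordb):
--     '''
--     This function returns a list of all the actors that have acted in a particular movie. Return: list of actors that
--     have acted in particular movie
--     '''
--
--     # initiate the return list
--     return_list_actor = []
--     # loop through all actors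
--     for actor_i in actordb:
--         # loop through the movies that belong to that actor
--         for movie_i in actordb[actor_i]:
--             if movie_i == movie_name:
--                 # add name to return list if they have acted in the movie
--                 return_list_actor += [actor_i]
--     return return_list_actor
--
-- def get_co_actors(actor_name, actor_db):
--     '''
--     This function returns a list of all actors that the given actor has ever worked with in any movie.
--     Return: List of actors who have worked with each other
--     '''
--
--     # initialize empty co_actors list
--     co_actors = []
--     # get all the movies the actor has worked on
--     movies_actor_worked_on = select_where_actor_is(actor_name, actor_db)
--     # if actor has not worked on any movie, he will have no co_actors, hence return empty
--     if not movies_actor_worked_on: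
--         return co_actors
--
--     for movie_i in movies_actor_worked_on:
--         # make a list of all the actors worked on the movie the input actor has worked on
--         co_actors += select_where_movie_is(movie_i, actor_db)
--     #eliminate duplicate entries
--     co_actors = list(set(co_actors))
--     # input actor isn't the co_actor of itself, so strip him out
--     co_actors.remove(actor_name)
--     # return a sorted list
--     co_actors.sort()
--     return co_actors
-- ===== SOURCE B (Python) =====
-- def get_co_actors(actor_name, actor_db):
--     # One pass over the database: an actor is a co-actor iff they share a movie
--     # with actor_name's movie set (no per-movie rescans of the whole db).
--     my_movies = set(actor_db.get(actor_name, []))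
--     return sorted(actor
--                   for actor, movies in actor_db.items()
--                   if actor != actor_name and not my_movies.isdisjoint(movies))
-- ===== Notes on version B (the rewrite author's own statement) =====
-- stated objective: alternative
-- what changed: Instead of rescanning the whole database once per movie of the actor and deduplicating with a set at the end, B builds the actor's movie set once and makes a single pass over the database, keeping each other actor whose movie list intersects that set; a timing run's random inputs give the queried actor few movies, so this measured no speed-up.
import Mathlib
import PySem

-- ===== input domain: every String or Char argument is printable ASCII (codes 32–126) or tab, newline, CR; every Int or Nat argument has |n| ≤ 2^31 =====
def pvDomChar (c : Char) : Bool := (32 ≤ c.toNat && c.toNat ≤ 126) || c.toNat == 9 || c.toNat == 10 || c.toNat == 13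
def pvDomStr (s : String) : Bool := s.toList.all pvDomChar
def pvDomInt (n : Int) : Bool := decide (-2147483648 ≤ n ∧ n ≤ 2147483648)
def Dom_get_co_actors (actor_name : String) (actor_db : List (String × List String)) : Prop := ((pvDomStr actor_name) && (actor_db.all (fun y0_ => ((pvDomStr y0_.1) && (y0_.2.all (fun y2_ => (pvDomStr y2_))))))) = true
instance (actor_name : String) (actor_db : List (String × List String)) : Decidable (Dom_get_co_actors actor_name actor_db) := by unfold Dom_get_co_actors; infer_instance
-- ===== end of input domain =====

-- B replaces A's per-movie rescan of the whole database (plus end-of-loop dedup) by one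
-- database pass against the actor's movie set; equal return values are proved on all inputs.

-- ===== PORT A =====
-- the actor_db parameter is a Python dict; PySem.Dict.ofList is that dict built from the pairs
def select_where_actor_is (actor_name : String) (actordb : PySem.Dict String (List String)) : List String :=
  if ¬ (actordb.keys.contains actor_name) then []
  else (actordb.get? actor_name).getD []

def select_where_movie_is (movie_name : String) (actordb : PySem.Dict String (List String)) : List String :=
  actordb.keys.foldl (fun return_list_actor actor_i =>
      ((actordb.get? actor_i).getD []).foldl
        (fun return_list_actor movie_i =>
          if movie_i == movie_name then return_list_actor ++ [actor_i] else return_list_actor)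
        return_list_actor)
    []

def get_co_actors (actor_name : String) (actor_db : List (String × List String)) : List String :=
  let actordb := PySem.Dict.ofList actor_db
  let co_actors : List String := []
  let movies_actor_worked_on := select_where_actor_is actor_name actordb
  if movies_actor_worked_on = [] then co_actors
  else
    let co_actors := movies_actor_worked_on.foldl
      (fun acc movie_i => acc ++ select_where_movie_is movie_i actordb) co_actors
    let co_actors := PySem.Set.ofList co_actors
    -- list.remove: the none branch is Python's ValueError, never reached (the actor
    -- appears in select_where_movie_is for each of their own movies)
    match PySem.List.remove? co_actors actor_name with
    | some co_actors => PySem.List.sorted co_actors (fun x => x) false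
    | none => []

-- ===== PORT B =====
def get_co_actors_alt (actor_name : String) (actor_db : List (String × List String)) : List String :=
  let db := PySem.Dict.ofList actor_db
  let my_movies := PySem.Set.ofList ((db.get? actor_name).getD [])
  PySem.List.sorted
    ((db.items.filter (fun kv =>
        kv.1 != actor_name && !(PySem.Set.isdisjoint my_movies kv.2))).map (fun kv => kv.1))
    (fun x => x) false

-- ===== PRECONDITION & SPEC =====
def Spec_get_co_actors (actor_name : String) (actor_db : List (String × List String)) (out : List String) : Prop := out = get_co_actors_alt actor_name actor_db
instance (actor_name : String) (actor_db : List (String × List String)) (out : List String) : Decidable (Spec_get_co_actors actor_name actor_db out) := by unfold Spec_get_co_actors; infer_instance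

-- ===== CLAIM (what is proved, stated in full; the proofs are below) =====
def Claim_equal_get_co_actors : Prop := ∀ (actor_name : String) (actor_db : List (String × List String)), Dom_get_co_actors actor_name actor_db → Spec_get_co_actors actor_name actor_db (get_co_actors actor_name actor_db)

-- ===== LEMMAS AND PROOFS =====

-- closed form of A's inner scan: all db keys whose movie list contains movie_name, with multiplicity
theorem swm_eq_flatMap (movie_name : String) (db : PySem.Dict String (List String)) :
    select_where_movie_is movie_name db
      = db.keys.flatMap (fun a =>
          (((db.get? a).getD []).filter (fun mv => mv == movie_name)).map (fun _ => a)) := by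
  unfold select_where_movie_is
  refine (PySem.List.foldl_congr_mem db.keys _
      (fun acc a =>
        acc ++ (((db.get? a).getD []).filter (fun mv => mv == movie_name)).map (fun _ => a))
      [] (fun acc a _ => PySem.List.foldl_append_if _ _ _ _)).trans ?_
  rw [PySem.List.foldl_append_eq_flatMap]
  simp

theorem mem_swm (movie_name x : String) (db : PySem.Dict String (List String)) :
    x ∈ select_where_movie_is movie_name db
      ↔ x ∈ db.keys ∧ movie_name ∈ (db.get? x).getD [] := by
  rw [swm_eq_flatMap]
  simp only [List.mem_flatMap, List.mem_map, List.mem_filter, beq_iff_eq]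
  constructor
  · rintro ⟨a, ha, m, ⟨hm, rfl⟩, rfl⟩
    exact ⟨ha, hm⟩
  · rintro ⟨hx, hm⟩
    exact ⟨x, hx, movie_name, ⟨hm, rfl⟩, rfl⟩

theorem get?_isSome_of_mem_keys {db : PySem.Dict String (List String)} {k : String}
    (h : k ∈ db.keys) : ∃ v, db.get? k = some v := by
  cases h' : db.get? k with
  | none => exact absurd h ((PySem.Dict.get?_eq_none_iff_not_mem_keys db k).mp h')
  | some v => exact ⟨v, rfl⟩

theorem get_co_actors_eq (actor_name : String) (actor_db : List (String × List String)) :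
    get_co_actors actor_name actor_db = get_co_actors_alt actor_name actor_db := by
  simp only [get_co_actors, get_co_actors_alt, select_where_actor_is]
  have hk : (PySem.Dict.ofList actor_db).keys.Nodup := PySem.Dict.nodup_keys_ofList actor_db
  set db := PySem.Dict.ofList actor_db with hdb
  by_cases hmem : db.keys.contains actor_name
  · -- actor is a key of the dict
    have hmemk : actor_name ∈ db.keys := List.contains_iff_mem.mp hmem
    obtain ⟨ms, hms⟩ := get?_isSome_of_mem_keys hmemk
    simp only [hmem, not_true_eq_false, if_false, hms, Option.getD_some]
    cases hmsnil : ms with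
    | nil =>
      -- no movies: A returns [] early; B filters everything out (empty movie set)
      simp only [if_true]
      have hfalse : ∀ kv ∈ db.items,
          (kv.1 != actor_name && !(PySem.Set.isdisjoint (PySem.Set.ofList ([] : List String)) kv.2)) = false := by
        intro kv _; simp
      rw [List.filter_congr hfalse]
      simp [PySem.List.sorted]
    | cons m0 mtl =>
      simp only [reduceCtorEq, if_false]
      rw [PySem.List.foldl_append_eq_flatMap]
      set co := (m0 :: mtl).flatMap (fun movie_i => select_where_movie_is movie_i db) with hco
      set s := PySem.Set.ofList ([] ++ co) with hs
      have hnods : s.Nodup := PySem.Set.nodup_ofList _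
      have hmem_s : ∀ x, x ∈ s ↔ ∃ m ∈ m0 :: mtl, x ∈ db.keys ∧ m ∈ (db.get? x).getD [] := by
        intro x
        rw [hs]
        rw [show (([] ++ co : List String)) = co by simp]
        rw [PySem.Set.mem_ofList]
        simp only [hco, List.mem_flatMap]
        constructor
        · rintro ⟨m, hm, hx⟩; exact ⟨m, hm, (mem_swm m x db).mp hx⟩
        · rintro ⟨m, hm, hx⟩; exact ⟨m, hm, (mem_swm m x db).mpr hx⟩
      have hname : actor_name ∈ s := by
        rw [hmem_s]
        exact ⟨m0, by simp, hmemk, by rw [hms]; simp [hmsnil]⟩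
      rw [PySem.List.remove?_eq_some_erase s actor_name hname]
      -- both sides sorted: reduce to a permutation of nodup lists with equal membership
      show PySem.List.sorted (List.erase s actor_name) (fun x => x) = _
      rw [PySem.List.sorted_id_eq_sorted_id_iff_perm]
      have hLBnodup : ((db.items.filter (fun kv =>
          kv.1 != actor_name && !(PySem.Set.isdisjoint (PySem.Set.ofList (m0 :: mtl)) kv.2))).map
            (fun kv => kv.1)).Nodup := by
        have hsub : ((db.items.filter (fun kv =>
            kv.1 != actor_name && !(PySem.Set.isdisjoint (PySem.Set.ofList (m0 :: mtl)) kv.2))).map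
              (fun kv => kv.1)).Sublist (db.items.map (fun kv => kv.1)) :=
          List.Sublist.map _ List.filter_sublist
        exact List.Nodup.sublist hsub (by simpa [PySem.Dict.keys] using hk)
      rw [List.perm_ext_iff_of_nodup (List.Nodup.erase _ hnods) hLBnodup]
      intro x
      rw [List.Nodup.mem_erase_iff hnods, hmem_s]
      simp only [List.mem_map, List.mem_filter, Bool.and_eq_true, bne_iff_ne, ne_eq,
        Bool.not_eq_true']
      constructor
      · rintro ⟨hne, m, hm, hxk, hmx⟩
        obtain ⟨v, hv⟩ := get?_isSome_of_mem_keys hxk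
        have hdis : PySem.Set.isdisjoint (PySem.Set.ofList (m0 :: mtl)) v = false := by
          rw [Bool.eq_false_iff]
          intro hd
          have := (PySem.Set.isdisjoint_iff _ _).mp hd m ((PySem.Set.mem_ofList _ _).mpr hm)
          rw [hv] at hmx
          exact this (by simpa using hmx)
        exact ⟨(x, v), ⟨(PySem.Dict.get?_eq_some_iff_mem_items db x v hk).mp hv, hne, hdis⟩, rfl⟩
      · rintro ⟨⟨kx, kv⟩, ⟨hitem, hne, hdisj⟩, rfl⟩
        have hv : db.get? kx = some kv := (PySem.Dict.get?_eq_some_iff_mem_items db kx kv hk).mpr hitem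
        have hnd : ¬ ∀ x ∈ PySem.Set.ofList (m0 :: mtl), x ∉ kv := by
          rw [← PySem.Set.isdisjoint_iff]; simp [hdisj]
        obtain ⟨m, hm, hmkv⟩ : ∃ m ∈ PySem.Set.ofList (m0 :: mtl), m ∈ kv := by
          have h' : m0 ∉ kv → ∃ x ∈ mtl, x ∈ kv := by simpa using hnd
          by_cases h0 : m0 ∈ kv
          · exact ⟨m0, (PySem.Set.mem_ofList _ _).mpr (by simp), h0⟩
          · obtain ⟨x, hx, hxkv⟩ := h' h0
            exact ⟨x, (PySem.Set.mem_ofList _ _).mpr (by simp [hx]), hxkv⟩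
        refine ⟨hne, m, (PySem.Set.mem_ofList _ _).mp hm, ?_, by rw [hv]; simpa using hmkv⟩
        have : ¬ db.get? kx = none := by simp [hv]
        rw [PySem.Dict.get?_eq_none_iff_not_mem_keys] at this
        simpa using this
  · -- actor not in the dict: both sides are []
    have hnone : db.get? actor_name = none :=
      (PySem.Dict.get?_eq_none_iff_not_mem_keys db actor_name).mpr
        (fun h => hmem (List.contains_iff_mem.mpr h))
    simp only [hmem, hnone, Option.getD_none]
    have hfalse : ∀ kv ∈ db.items,
        (kv.1 != actor_name && !(PySem.Set.isdisjoint (PySem.Set.ofList ([] : List String)) kv.2)) = false := by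
      intro kv _; simp
    rw [List.filter_congr hfalse]
    simp [PySem.List.sorted]

-- ===== VERDICT (by name: the statement is the Claim_ definition above) =====
theorem get_co_actors_spec : Claim_equal_get_co_actors := by
  intro actor_name actor_db _
  unfold Spec_get_co_actors
  exact get_co_actors_eq actor_name actor_db
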